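-- pv_equiv track=rewrite | github.com/SupremeBender/ajac-website | apps/mission-signup/mission_manager.py | _assign_next_transponder
-- ===== SOURCE A (Python) =====
-- def _assign_next_transponder(mission):
--     """Assign next available transponder block. Only uses octal digits (0-7)"""
--     used = set(mission["assigned_transponders"])
--
--     # Start from 1000 and increment by 10, but ensure all digits are 0-7
--     for i in range(1000, 7777, 10):
--         # Convert to string to check digits
--         code = str(i)
--         # Skip if any digit is 8 or 9
--         if any(d > '7' for d in code):
--             continue
--
--         if i not in used:
--             mission["assigned_transponders"].append(i)
--             # Create a block of 4 transponder codes
--             return [i, i+1, i+2, i+3]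
--     return None
-- ===== SOURCE B (Python) =====
-- def _assign_next_transponder(mission):
--     """Assign next available transponder block. Only uses octal digits (0-7)"""
--     used = set(mission["assigned_transponders"])
--
--     # Enumerate only valid octal-digit codes directly, in ascending order.
--     for d1 in range(1, 8):
--         for d2 in range(8):
--             for d3 in range(8):
--                 code = d1 * 1000 + d2 * 100 + d3 * 10
--                 if code not in used:
--                     mission["assigned_transponders"].append(code)
--                     return [code, code + 1, code + 2, code + 3]
--     return None
-- ===== Notes on version B (the rewrite author's own statement) =====
-- stated objective: idiomatic
-- what changed: Replaces the flat scan over range(1000,7777,10) with str(i)-digit filtering by three nested loops over the octal digit positions that generate only valid codes directly (no string conversion, no skipped candidates).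
import Mathlib
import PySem

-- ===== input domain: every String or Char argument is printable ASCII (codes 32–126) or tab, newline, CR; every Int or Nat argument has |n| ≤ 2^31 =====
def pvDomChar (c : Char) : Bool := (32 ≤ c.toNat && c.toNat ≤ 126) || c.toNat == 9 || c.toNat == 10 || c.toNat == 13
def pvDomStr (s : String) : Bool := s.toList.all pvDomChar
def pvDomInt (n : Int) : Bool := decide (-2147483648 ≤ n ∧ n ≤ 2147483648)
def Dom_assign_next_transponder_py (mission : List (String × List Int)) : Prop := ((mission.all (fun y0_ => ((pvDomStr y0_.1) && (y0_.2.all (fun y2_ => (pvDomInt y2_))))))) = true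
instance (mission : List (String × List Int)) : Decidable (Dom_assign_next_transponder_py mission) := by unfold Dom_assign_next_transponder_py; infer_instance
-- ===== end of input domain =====

-- B enumerates only valid octal-digit codes with three nested digit loops instead of
-- scanning range(1000,7777,10) and filtering by str(i); return values proved equal
-- (A also appends the chosen code to mission["assigned_transponders"]; B performs the
-- same mutation in Python — the equivalence proved here is about the return value).

-- ===== PORT A =====
-- the 'for i in range(1000, 7777, 10)' loop with its two branches (continue / return)
def pvLoopA (used : PySem.Set Int) : List Int → Option (List Int)
  | [] => none
  | i :: rest =>
    if ((PySem.Int.toStr i).toList.any (fun d => decide ('7' < d))) then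
      pvLoopA used rest
    else if !(PySem.Set.contains used i) then
      some [i, i + 1, i + 2, i + 3]
    else
      pvLoopA used rest

def assign_next_transponder_py (mission : List (String × List Int)) : Option (List Int) :=
  match mission.find? (fun kv => kv.1 == "assigned_transponders") with
  | none => none   -- KeyError in Python; excluded by Pre_
  | some kv => pvLoopA (PySem.Set.ofList kv.2) (PySem.List.pyRange 1000 7777 10)

-- ===== PORT B =====
-- innermost 'for d3 in range(8)' loop
def pvLoopB3 (used : PySem.Set Int) (d1 d2 : Int) : List Int → Option (List Int)
  | [] => none
  | d3 :: rest =>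
    let code := d1 * 1000 + d2 * 100 + d3 * 10
    if !(PySem.Set.contains used code) then
      some [code, code + 1, code + 2, code + 3]
    else
      pvLoopB3 used d1 d2 rest

-- 'for d2 in range(8)' loop: an early return from the inner loop propagates out
def pvLoopB2 (used : PySem.Set Int) (d1 : Int) : List Int → Option (List Int)
  | [] => none
  | d2 :: rest =>
    match pvLoopB3 used d1 d2 (PySem.List.pyRange 0 8 1) with
    | some r => some r
    | none => pvLoopB2 used d1 rest

-- 'for d1 in range(1, 8)' loop
def pvLoopB1 (used : PySem.Set Int) : List Int → Option (List Int)
  | [] => none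
  | d1 :: rest =>
    match pvLoopB2 used d1 (PySem.List.pyRange 0 8 1) with
    | some r => some r
    | none => pvLoopB1 used rest

def assign_next_transponder_py_alt (mission : List (String × List Int)) : Option (List Int) :=
  match mission.find? (fun kv => kv.1 == "assigned_transponders") with
  | none => none   -- KeyError in Python; excluded by Pre_
  | some kv => pvLoopB1 (PySem.Set.ofList kv.2) (PySem.List.pyRange 1 8 1)

-- ===== PRECONDITION & SPEC =====
-- Pre_ excludes only missions without the key "assigned_transponders", on which Python raises KeyError.
def Pre_assign_next_transponder_py (mission : List (String × List Int)) : Prop :=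
  "assigned_transponders" ∈ mission.map Prod.fst

instance (mission : List (String × List Int)) : Decidable (Pre_assign_next_transponder_py mission) := by
  unfold Pre_assign_next_transponder_py; infer_instance

def pvWitness_assign_next_transponder_py : (List (String × List Int)) :=
  [("assigned_transponders", [1000, 1010])]

def Spec_assign_next_transponder_py (mission : List (String × List Int)) (out : Option (List Int)) : Prop := out = assign_next_transponder_py_alt mission
instance (mission : List (String × List Int)) (out : Option (List Int)) : Decidable (Spec_assign_next_transponder_py mission out) := by unfold Spec_assign_next_transponder_py; infer_instance

-- ===== CLAIM (what is proved, stated in full; the proofs are below) =====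
def Claim_equal_assign_next_transponder_py : Prop := ∀ (mission : List (String × List Int)), Dom_assign_next_transponder_py mission → Pre_assign_next_transponder_py mission → Spec_assign_next_transponder_py mission (assign_next_transponder_py mission)

-- ===== LEMMAS AND PROOFS =====

-- first candidate of a list not in `used`, turned into its 4-code block
def pvScan (used : PySem.Set Int) : List Int → Option (List Int)
  | [] => none
  | c :: rest =>
    if !(PySem.Set.contains used c) then some [c, c + 1, c + 2, c + 3]
    else pvScan used rest

def pvOkDigits (i : Int) : Bool := !((PySem.Int.toStr i).toList.any (fun d => decide ('7' < d)))

theorem pvScan_append (used : PySem.Set Int) (l1 l2 : List Int) :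
    pvScan used (l1 ++ l2) =
      match pvScan used l1 with
      | some r => some r
      | none => pvScan used l2 := by
  induction l1 with
  | nil => simp [pvScan]
  | cons c rest ih =>
    simp only [List.cons_append, pvScan]
    split_ifs <;> simp [ih]

theorem pvLoopA_eq_scan (used : PySem.Set Int) (L : List Int) :
    pvLoopA used L = pvScan used (L.filter pvOkDigits) := by
  induction L with
  | nil => rfl
  | cons i rest ih =>
    cases h : ((PySem.Int.toStr i).toList.any (fun d => decide ('7' < d))) with
    | true =>
      simp only [pvLoopA, List.filter_cons, pvOkDigits, h]
      simp [ih]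
    | false =>
      simp only [pvLoopA, List.filter_cons, pvOkDigits, h]
      simp [pvScan, ih]

theorem pvLoopB3_eq_scan (used : PySem.Set Int) (d1 d2 : Int) (ds : List Int) :
    pvLoopB3 used d1 d2 ds = pvScan used (ds.map (fun d3 => d1 * 1000 + d2 * 100 + d3 * 10)) := by
  induction ds with
  | nil => rfl
  | cons d3 rest ih => simp only [pvLoopB3, List.map_cons, pvScan, ih]

theorem pvLoopB2_eq_scan (used : PySem.Set Int) (d1 : Int) (ds : List Int) :
    pvLoopB2 used d1 ds =
      pvScan used (ds.flatMap (fun d2 =>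
        (PySem.List.pyRange 0 8 1).map (fun d3 => d1 * 1000 + d2 * 100 + d3 * 10))) := by
  induction ds with
  | nil => rfl
  | cons d2 rest ih =>
    simp only [pvLoopB2, List.flatMap_cons, pvScan_append, pvLoopB3_eq_scan, ih]

theorem pvLoopB1_eq_scan (used : PySem.Set Int) (ds : List Int) :
    pvLoopB1 used ds =
      pvScan used (ds.flatMap (fun d1 => (PySem.List.pyRange 0 8 1).flatMap (fun d2 =>
        (PySem.List.pyRange 0 8 1).map (fun d3 => d1 * 1000 + d2 * 100 + d3 * 10)))) := by
  induction ds with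
  | nil => rfl
  | cons d1 rest ih =>
    simp only [pvLoopB1, List.flatMap_cons, pvScan_append, pvLoopB2_eq_scan, ih]

-- A's filtered candidates are exactly B's generated codes, in the same order
set_option maxRecDepth 40000 in
theorem pvCandidates_eq :
    (PySem.List.pyRange 1000 7777 10).filter pvOkDigits =
      (PySem.List.pyRange 1 8 1).flatMap (fun d1 => (PySem.List.pyRange 0 8 1).flatMap (fun d2 =>
        (PySem.List.pyRange 0 8 1).map (fun d3 => d1 * 1000 + d2 * 100 + d3 * 10))) := by
  decide

-- ===== VERDICT (by name: the statement is the Claim_ definition above) =====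
theorem assign_next_transponder_py_spec : Claim_equal_assign_next_transponder_py := by
  intro mission _ _
  unfold Spec_assign_next_transponder_py assign_next_transponder_py assign_next_transponder_py_alt
  cases mission.find? (fun kv => kv.1 == "assigned_transponders") with
  | none => rfl
  | some kv =>
    simp only [pvLoopA_eq_scan, pvLoopB1_eq_scan, pvCandidates_eq]
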